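-- pv_equiv track=rewrite | github.com/Wendystar0628/Circuit-Design-AI-Assistant | domain/simulation/measure/measure_injector.py | extract_measures
-- ===== SOURCE A (Python) =====
-- from typing import List, Optional, Tuple
--
-- def extract_measures(netlist: str) -> List[str]:
--     """
--     从网表中提取现有的 .MEASURE 语句（包括续行）
--
--     Args:
--         netlist: 网表内容
--
--     Returns:
--         List[str]: .MEASURE 语句列表
--     """
--     measures = []
--     lines = netlist.split("\n")
--     current_measure = None
--
--     for line in lines:
--         stripped = line.strip()
--         if stripped.upper().startswith(".MEASURE"):
--             # 保存之前的测量语句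
--             if current_measure:
--                 measures.append(current_measure)
--             current_measure = stripped
--         elif current_measure and stripped.startswith("+"):
--             # 续行
--             current_measure += " " + stripped[1:].strip()
--         else:
--             # 非测量语句，保存当前测量
--             if current_measure:
--                 measures.append(current_measure)
--                 current_measure = None
--
--     # 保存最后一个测量语句
--     if current_measure:
--         measures.append(current_measure)
--
--     return measures
-- ===== SOURCE B (Python) =====
-- def extract_measures(netlist: str):
--     """Fold the netlist into complete logical lines (continuations joined),
--     then filter the logical lines that are .MEASURE statements."""
--     logical = []
--     for line in netlist.split("\n"):
--         s = line.strip()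
--         if s.startswith("+") and logical:
--             logical[-1] += " " + s[1:].strip()
--         else:
--             logical.append(s)
--     return [L for L in logical if L.upper().startswith(".MEASURE")]
-- ===== Notes on version B (the rewrite author's own statement) =====
-- stated objective: simpler
-- what changed: Replaces A's interleaved accumulate/flush state machine (measures list + current_measure Optional) by a fold that builds complete logical lines (joining '+' continuations onto the previous line) followed by a filter keeping the .MEASURE lines.
import Mathlib
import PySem

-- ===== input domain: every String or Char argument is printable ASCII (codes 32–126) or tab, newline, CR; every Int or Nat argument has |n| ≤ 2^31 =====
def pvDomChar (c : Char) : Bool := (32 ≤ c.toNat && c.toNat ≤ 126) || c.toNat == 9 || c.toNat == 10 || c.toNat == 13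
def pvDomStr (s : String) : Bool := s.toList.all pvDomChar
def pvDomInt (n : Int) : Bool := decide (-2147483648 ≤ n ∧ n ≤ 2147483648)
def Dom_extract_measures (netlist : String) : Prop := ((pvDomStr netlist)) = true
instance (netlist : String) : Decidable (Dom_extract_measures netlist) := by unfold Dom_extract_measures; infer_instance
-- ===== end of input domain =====

-- B replaces A's interleaved accumulate/flush state machine by a fold into complete
-- logical lines followed by a filter of the .MEASURE lines (simpler decomposition).

-- ===== PORT A =====
-- Python truthiness of the Optional[str] current_measure ('if current_measure:')
def pvTruthy (c : Option String) : Bool :=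
  match c with
  | none => false
  | some s => !s.toList.isEmpty

-- 'if current_measure: measures.append(current_measure)'
def pvFlushA (ms : List String) (c : Option String) : List String :=
  if pvTruthy c then ms ++ [c.getD ""] else ms

-- the body of A's for-loop, state = (measures, current_measure)
def pvStepA (st : List String × Option String) (line : String) : List String × Option String :=
  let stripped := PySem.Str.strip line
  if PySem.Str.startswith (PySem.Str.upper stripped) ".MEASURE" then
    (pvFlushA st.1 st.2, some stripped)
  else if pvTruthy st.2 && PySem.Str.startswith stripped "+" then
    -- current_measure += " " + stripped[1:].strip()
    (st.1, some (st.2.getD "" ++ " " ++ PySem.Str.strip (PySem.Str.slice stripped (some 1) none)))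
  else
    (pvFlushA st.1 st.2, none)

def extract_measures (netlist : String) : List String :=
  -- netlist.split("\n"): the separator is the nonempty literal "\n", so split? is some
  let lines : List String := (PySem.Str.split? netlist "\n").getD []
  let st := lines.foldl pvStepA ([], none)
  pvFlushA st.1 st.2

-- ===== PORT B =====
-- the body of B's for-loop, state = logical (the complete logical lines so far)
def pvStepB (ls : List String) (line : String) : List String :=
  let s := PySem.Str.strip line
  if PySem.Str.startswith s "+" && !ls.isEmpty then
    -- logical[-1] += " " + s[1:].strip()
    ls.dropLast ++ [ls.getLast?.getD "" ++ " " ++ PySem.Str.strip (PySem.Str.slice s (some 1) none)]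
  else
    ls ++ [s]

def extract_measures_alt (netlist : String) : List String :=
  let lines : List String := (PySem.Str.split? netlist "\n").getD []
  let logical := lines.foldl pvStepB []
  logical.filter (fun L => PySem.Str.startswith (PySem.Str.upper L) ".MEASURE")

-- ===== PRECONDITION & SPEC =====
def Spec_extract_measures (netlist : String) (out : List String) : Prop := out = extract_measures_alt netlist
instance (netlist : String) (out : List String) : Decidable (Spec_extract_measures netlist out) := by unfold Spec_extract_measures; infer_instance

-- ===== CLAIM (what is proved, stated in full; the proofs are below) =====
def Claim_equal_extract_measures : Prop := ∀ (netlist : String), Dom_extract_measures netlist → Spec_extract_measures netlist (extract_measures netlist)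

-- ===== LEMMAS AND PROOFS =====

-- B's filter predicate: is the logical line a .MEASURE statement?
def pvMP (L : String) : Bool := PySem.Str.startswith (PySem.Str.upper L) ".MEASURE"

-- a .MEASURE line is nonempty (so A's truthiness test on it succeeds)
lemma pvMP_ne_nil {m : String} (h : pvMP m = true) : m.toList.isEmpty = false := by
  cases hm : m.toList with
  | nil =>
    exfalso
    simp only [pvMP, PySem.Str.startswith_eq, PySem.Str.toList_upper, hm,
      PySem.Chars.upper, List.map_nil] at h
    rw [PySem.Chars.startswith_iff] at h
    exact absurd (List.prefix_nil.mp h) (by decide)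
  | cons a l => simp

-- extending a .MEASURE line keeps it a .MEASURE line
lemma pvMP_append {m t : String} (h : pvMP m = true) : pvMP (m ++ t) = true := by
  simp only [pvMP, PySem.Str.startswith_eq, PySem.Str.toList_upper, String.toList_append,
    PySem.Chars.upper, List.map_append] at h ⊢
  rw [PySem.Chars.startswith_iff] at h ⊢
  exact h.trans (List.prefix_append _ _)

-- a .MEASURE line does not start with '+'
lemma pvMP_not_plus {s : String} (h : pvMP s = true) :
    PySem.Str.startswith s "+" = false := by
  by_contra hp
  rw [Bool.not_eq_false] at hp
  rw [PySem.Str.startswith_eq, PySem.Chars.startswith_iff] at hp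
  obtain ⟨r, hr⟩ := hp
  have h1 : "+".toList = ['+'] := by decide
  rw [h1] at hr
  have hd : s.toList = '+' :: r := hr.symm
  simp only [pvMP, PySem.Str.startswith_eq, PySem.Str.toList_upper, hd,
    PySem.Chars.upper, List.map_cons] at h
  rw [PySem.Chars.startswith_iff] at h
  obtain ⟨r2, hr2⟩ := h
  have h2 : ".MEASURE".toList = '.' :: ".MEASURE".toList.tail := by decide
  rw [h2] at hr2
  have hup : PySem.Chars.upperChar '+' = '+' := by decide
  simp [hup] at hr2

-- appending " " ++ t to a non-measure line keeps it non-measure: either the line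
-- already has ≥ 8 chars (the prefix test only reads those) or the test would have
-- to read the inserted ' ', which does not occur in ".MEASURE"
lemma pvMP_not_append_space {L t : String} (h : pvMP L = false) :
    pvMP (L ++ " " ++ t) = false := by
  by_contra hc
  rw [Bool.not_eq_false] at hc
  rw [pvMP, Bool.eq_false_iff] at h
  apply h
  simp only [pvMP, PySem.Str.startswith_eq, PySem.Str.toList_upper, String.toList_append,
    PySem.Chars.upper, List.map_append] at hc ⊢
  rw [PySem.Chars.startswith_iff] at hc ⊢
  have hsp : (" " : String).toList.map PySem.Chars.upperChar = [' '] := by decide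
  rw [hsp] at hc
  set p : List Char := ".MEASURE".toList with hp
  set u : List Char := L.toList.map PySem.Chars.upperChar with hu
  set w : List Char := t.toList.map PySem.Chars.upperChar with hw
  by_cases hlen : p.length ≤ u.length
  · exact List.prefix_of_prefix_length_le (by simpa using hc)
      (List.prefix_append u ([' '] ++ w)) hlen
  · exfalso
    rw [Nat.not_le] at hlen
    obtain ⟨r, hr⟩ := hc
    have h1' : (p ++ r)[u.length]? = some (p[u.length]'(by omega)) := by
      rw [List.getElem?_append_left (by omega)]
      simp
    have h2' : (u ++ [' '] ++ w)[u.length]? = some ' ' := by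
      rw [List.append_assoc, List.getElem?_append_right (le_refl _)]
      simp
    rw [hr, h2'] at h1'
    have hpe : p[u.length]'(by omega) = ' ' := (Option.some_inj.mp h1').symm
    have hmem : (' ' : Char) ∈ p := hpe ▸ List.getElem_mem _
    rw [hp] at hmem
    exact absurd hmem (by decide)

-- the loop invariant: A's state (ms, c) and B's logical-line list ls agree —
-- flushing A's state now gives exactly the .MEASURE lines among ls, and c holds
-- the last logical line of ls exactly when that line is a .MEASURE line
def pvInv (ms : List String) (c : Option String) (ls : List String) : Prop :=
  ls.filter pvMP = pvFlushA ms c ∧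
  (∀ m, c = some m → pvMP m = true ∧ ls.getLast? = some m) ∧
  (c = none → ∀ m, ls.getLast? = some m → pvMP m = false)

lemma pvFlushA_some_of_MP (ms : List String) {m : String} (h : pvMP m = true) :
    pvFlushA ms (some m) = ms ++ [m] := by
  simp [pvFlushA, pvTruthy, pvMP_ne_nil h]

lemma pvStepA_eq (ms : List String) (c : Option String) (line : String) :
    pvStepA (ms, c) line =
      (if pvMP (PySem.Str.strip line) then
        (pvFlushA ms c, some (PySem.Str.strip line))
      else if pvTruthy c && PySem.Str.startswith (PySem.Str.strip line) "+" then
        (ms, some (c.getD "" ++ " " ++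
          PySem.Str.strip (PySem.Str.slice (PySem.Str.strip line) (some 1) none)))
      else (pvFlushA ms c, none)) := rfl

-- one loop step preserves the invariant
lemma pvStep_inv (st : List String × Option String) (ls : List String) (line : String)
    (hinv : pvInv st.1 st.2 ls) :
    pvInv (pvStepA st line).1 (pvStepA st line).2 (pvStepB ls line) := by
  obtain ⟨ms, c⟩ := st
  obtain ⟨h1, h2, h3⟩ := hinv
  rw [pvStepA_eq, pvStepB]
  set s := PySem.Str.strip line with hs
  by_cases hm : pvMP s = true
  · -- .MEASURE line: A flushes and restarts, B appends a new logical line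
    have hplus := pvMP_not_plus hm
    rw [hm, if_pos rfl, hplus]
    simp only [Bool.false_and]
    rw [if_neg (by simp)]
    refine ⟨?_, ?_, by simp⟩
    · rw [List.filter_append, h1, pvFlushA_some_of_MP _ hm]
      simp [hm]
    · intro m hmm
      cases hmm
      exact ⟨hm, List.getLast?_concat⟩
  · rw [Bool.not_eq_true] at hm
    rw [hm, if_neg (by simp)]
    by_cases hplus : PySem.Str.startswith s "+" = true
    · rcases List.eq_nil_or_concat ls with hnil | ⟨init, lst, hconc⟩
      · -- leading continuation with no predecessor: A ignores it, B starts a junk line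
        subst hnil
        have hc : c = none := by
          cases c with
          | none => rfl
          | some m => simpa using (h2 m rfl).2
        subst hc
        simp only [pvTruthy, Bool.false_and]
        rw [if_neg (by simp), if_neg (by simp)]
        refine ⟨?_, by simp, ?_⟩
        · simpa [hm, pvFlushA, pvTruthy] using h1
        · intro _ m hmm
          simp only [List.nil_append, List.getLast?_singleton, Option.some_inj] at hmm
          subst hmm; exact hm
      · rw [List.concat_eq_append] at hconc
        subst hconc
        cases c with
        | some m =>
          -- continuation of a measure: both extend the same line by " " ++ tail
          obtain ⟨hMPm, hlast⟩ := h2 m rfl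
          rw [List.getLast?_concat, Option.some_inj] at hlast
          subst hlast
          have htr : pvTruthy (some lst) = true := by
            simp [pvTruthy, pvMP_ne_nil hMPm]
          rw [if_pos (show (pvTruthy (some lst) && PySem.Str.startswith s "+") = true by
            rw [htr, hplus]; rfl)]
          rw [if_pos (show (PySem.Str.startswith s "+" && !(init ++ [lst]).isEmpty) = true by
            rw [hplus]; simp)]
          rw [List.dropLast_concat, List.getLast?_concat]
          simp only [Option.getD_some]
          have hMP' : pvMP (lst ++ " " ++ PySem.Str.strip (PySem.Str.slice s (some 1) none)) = true :=
            pvMP_append (pvMP_append hMPm)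
          refine ⟨?_, ?_, by simp⟩
          · rw [List.filter_append, pvFlushA_some_of_MP _ hMPm] at h1
            simp only [List.filter_cons, List.filter_nil, hMPm] at h1
            have hinit : init.filter pvMP = ms := List.append_cancel_right h1
            rw [List.filter_append, hinit, pvFlushA_some_of_MP _ hMP']
            simp [hMP']
          · intro m' hmm
            cases hmm
            exact ⟨hMP', List.getLast?_concat⟩
        | none =>
          -- continuation after a non-measure line: A ignores it, B grows the junk line
          have hlastF : pvMP lst = false := h3 rfl lst List.getLast?_concat
          rw [if_neg (show ¬((pvTruthy none && PySem.Str.startswith s "+") = true) by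
            simp [pvTruthy])]
          rw [if_pos (show (PySem.Str.startswith s "+" && !(init ++ [lst]).isEmpty) = true by
            rw [hplus]; simp)]
          rw [List.dropLast_concat, List.getLast?_concat]
          simp only [Option.getD_some]
          have hMP' : pvMP (lst ++ " " ++ PySem.Str.strip (PySem.Str.slice s (some 1) none)) = false :=
            pvMP_not_append_space hlastF
          refine ⟨?_, by simp, ?_⟩
          · rw [List.filter_append] at h1 ⊢
            simp only [List.filter_cons, List.filter_nil, hlastF, hMP',
              Bool.false_eq_true, if_false, List.append_nil] at h1 ⊢
            simpa [pvFlushA, pvTruthy] using h1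
          · intro _ m hmm
            rw [List.getLast?_concat, Option.some_inj] at hmm
            subst hmm; exact hMP'
    · -- ordinary line: A flushes, B appends a non-measure logical line
      rw [Bool.not_eq_true] at hplus
      rw [hplus]
      simp only [Bool.false_and, Bool.and_false]
      rw [if_neg (by simp), if_neg (by simp)]
      refine ⟨?_, by simp, ?_⟩
      · rw [List.filter_append, h1]
        simp [hm, pvFlushA, pvTruthy]
      · intro _ m hmm
        rw [List.getLast?_concat, Option.some_inj] at hmm
        subst hmm; exact hm

-- the invariant carried over the whole loop gives A's result = B's result
lemma pvLoop_agree (lines : List String) (st : List String × Option String)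
    (ls : List String) (hinv : pvInv st.1 st.2 ls) :
    pvFlushA (lines.foldl pvStepA st).1 (lines.foldl pvStepA st).2
      = (lines.foldl pvStepB ls).filter pvMP := by
  induction lines generalizing st ls with
  | nil => exact hinv.1.symm
  | cons line rest ih =>
    simp only [List.foldl_cons]
    exact ih _ _ (pvStep_inv st ls line hinv)

-- ===== VERDICT (by name: the statement is the Claim_ definition above) =====
theorem extract_measures_spec : Claim_equal_extract_measures := by
  intro netlist _
  show extract_measures netlist = extract_measures_alt netlist
  unfold extract_measures extract_measures_alt
  exact pvLoop_agree ((PySem.Str.split? netlist "\n").getD []) ([], none) []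
    ⟨by simp [pvFlushA, pvTruthy], by simp, by simp⟩
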